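-- pv_equiv track=rewrite | github.com/morsedan/CodePuzzles | HowManyWords.py | howMany
-- ===== SOURCE A (Python) =====
-- def howMany(sentence):
--     # Variables & Constants
--     alphabet_with_misc = "abcdefghijklmnopqrstuvwxyz-"
--     punctuation = ".,?!"
--     stripped_sentence = ""
--     words = []
--
--     # Strip punctuation
--     for letter in sentence:
--         if letter not in punctuation:
--             stripped_sentence += letter
--
--     # Add words without invalid characters to list of words
--     for potential_word in stripped_sentence.split():
--         this_word = ""
--         for letter in potential_word:
--             if letter.lower() in alphabet_with_misc:
--                 this_word += letter
--         if this_word == potential_word: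
--             words.append(this_word)
--
--     return len(words)
-- ===== SOURCE B (Python) =====
-- def howMany(sentence):
--     count = 0
--     has_char = False
--     clean = True
--     for ch in sentence:
--         if ch in ".,?!":
--             continue
--         if ch.isspace():
--             if has_char and clean:
--                 count += 1
--             has_char = False
--             clean = True
--         else:
--             has_char = True
--             if ch.lower() not in "abcdefghijklmnopqrstuvwxyz-":
--                 clean = False
--     if has_char and clean:
--         count += 1
--     return count
-- ===== Notes on version B (the rewrite author's own statement) =====
-- stated objective: faster
-- what changed: Replaced A's three phases (build a punctuation-stripped copy, split it into words, rebuild each word char-by-char and compare) with a single streaming pass over the characters keeping only a counter, a has-content flag and a clean flag.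
import Mathlib
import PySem

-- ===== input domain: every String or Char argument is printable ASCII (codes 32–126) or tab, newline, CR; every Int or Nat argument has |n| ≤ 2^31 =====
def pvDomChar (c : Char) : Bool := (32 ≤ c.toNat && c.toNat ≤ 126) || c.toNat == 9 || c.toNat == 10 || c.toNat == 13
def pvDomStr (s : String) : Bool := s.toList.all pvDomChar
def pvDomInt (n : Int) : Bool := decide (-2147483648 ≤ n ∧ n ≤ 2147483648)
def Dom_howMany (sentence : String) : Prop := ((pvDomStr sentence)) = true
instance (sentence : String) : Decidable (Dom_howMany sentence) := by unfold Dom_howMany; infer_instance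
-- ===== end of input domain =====

-- B replaces A's three phases (strip punctuation into a new string, split, rebuild each
-- word and compare) with one streaming pass keeping a counter and two flags (objective: faster).

-- ===== PORT A =====
def howMany (sentence : String) : Int :=
  let alphabet : List Char := "abcdefghijklmnopqrstuvwxyz-".toList
  let punct : List Char := ".,?!".toList
  -- strip punctuation
  let stripped : List Char :=
    sentence.toList.foldl (fun acc c => if punct.contains c then acc else acc ++ [c]) []
  -- add words without invalid characters to the list of words
  let words : List (List Char) :=
    (PySem.Chars.split₀ stripped).foldl (fun ws pw =>
      let tw := pw.foldl
        (fun acc c => if alphabet.contains (PySem.Chars.lowerChar c) then acc ++ [c] else acc) []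
      if tw == pw then ws ++ [tw] else ws) []
  (words.length : Int)

-- ===== PORT B =====
-- B-side helpers (the named pieces of Source B's single loop)
def pvValid (c : Char) : Bool := ("abcdefghijklmnopqrstuvwxyz-".toList).contains (PySem.Chars.lowerChar c)

def pvPunct (c : Char) : Bool := (".,?!".toList).contains c

-- loop body for a non-punctuation character: state = (count, has_char, clean)
def pvStep (st : Int × Bool × Bool) (c : Char) : Int × Bool × Bool :=
  if PySem.Chars.isspace c then
    ((if st.2.1 && st.2.2 then st.1 + 1 else st.1), false, true)
  else
    (st.1, true, st.2.2 && pvValid c)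

-- final flush of the pending word
def pvFin (st : Int × Bool × Bool) : Int :=
  if st.2.1 && st.2.2 then st.1 + 1 else st.1

def howMany_alt (sentence : String) : Int :=
  pvFin (sentence.toList.foldl (fun st c => if pvPunct c then st else pvStep st c) (0, false, true))

-- ===== PRECONDITION & SPEC =====
def Spec_howMany (sentence : String) (out : Int) : Prop := out = howMany_alt sentence
instance (sentence : String) (out : Int) : Decidable (Spec_howMany sentence out) := by unfold Spec_howMany; infer_instance

-- ===== CLAIM (what is proved, stated in full; the proofs are below) =====
def Claim_equal_howMany : Prop := ∀ (sentence : String), Dom_howMany sentence → Spec_howMany sentence (howMany sentence)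

-- ===== LEMMAS AND PROOFS =====

-- unfolding equations for PySem.Chars.split₀.go
lemma pv_go_nil (cur : List Char) (acc : List (List Char)) :
    PySem.Chars.split₀.go [] cur acc
      = if cur.isEmpty then acc.reverse else (cur.reverse :: acc).reverse := rfl

lemma pv_go_cons (c : Char) (rest cur : List Char) (acc : List (List Char)) :
    PySem.Chars.split₀.go (c :: rest) cur acc
      = if PySem.Chars.isspace c then
          (if cur.isEmpty then PySem.Chars.split₀.go rest [] acc
           else PySem.Chars.split₀.go rest [] (cur.reverse :: acc))
        else PySem.Chars.split₀.go rest (c :: cur) acc := rfl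

-- count of all-valid words, as an Int
def pvCount (ws : List (List Char)) : Int := ((ws.filter (fun w => w.all pvValid)).length : Int)

lemma pvCount_nil : pvCount [] = 0 := rfl

lemma pvCount_cons (w : List Char) (ws : List (List Char)) :
    pvCount (w :: ws) = (if w.all pvValid then 1 else 0) + pvCount ws := by
  unfold pvCount
  rw [List.filter_cons]
  by_cases h : w.all pvValid = true
  · simp [h]
    omega
  · simp [h]

-- building a list with append-if-not is filtering out
lemma pv_foldl_append_ifnot (p : Char → Bool) :
    ∀ (l acc : List Char),
      l.foldl (fun a x => if p x then a else a ++ [x]) acc = acc ++ l.filter (fun x => !p x) := by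
  intro l
  induction l with
  | nil => simp
  | cons c l ih =>
      intro acc
      by_cases h : p c = true <;> simp [h, ih]

-- the inner per-word rebuild is a filter
lemma pv_inner_filter (pw : List Char) :
    pw.foldl (fun a c => if pvValid c then a ++ [c] else a) [] = pw.filter pvValid := by
  have : ∀ (l acc : List Char),
      l.foldl (fun a c => if pvValid c then a ++ [c] else a) acc = acc ++ l.filter pvValid := by
    intro l
    induction l with
    | nil => simp
    | cons c l ih =>
        intro acc
        by_cases h : pvValid c = true <;> simp [h, ih]
  simpa using this pw []

-- A's outer word loop keeps exactly the all-valid words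
lemma pv_words_loop :
    ∀ (l : List (List Char)) (acc : List (List Char)),
      l.foldl (fun ws pw => if pw.filter pvValid == pw then ws ++ [pw.filter pvValid] else ws) acc
      = acc ++ l.filter (fun pw => pw.all pvValid) := by
  intro l
  induction l with
  | nil => simp
  | cons pw l ih =>
      intro acc
      rw [List.foldl_cons, List.filter_cons]
      by_cases h : pw.all pvValid = true
      · have hfe : pw.filter pvValid = pw := List.filter_eq_self.mpr (by
          intro a ha; exact (List.all_eq_true.mp h) a ha)
        rw [if_pos (by simpa using hfe), hfe, ih]
        simp [h]
      · have hne : pw.filter pvValid ≠ pw := by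
          intro hfe
          exact h (List.all_eq_true.mpr (List.filter_eq_self.mp hfe))
        rw [if_neg (by simpa using hne), ih]
        simp [h]

-- split₀.go with a nonempty accumulator prepends the finished words
lemma pv_go_acc :
    ∀ (ds cur : List Char) (acc : List (List Char)),
      PySem.Chars.split₀.go ds cur acc = acc.reverse ++ PySem.Chars.split₀.go ds cur [] := by
  intro ds
  induction ds with
  | nil =>
      intro cur acc
      by_cases h : cur.isEmpty = true <;> simp [pv_go_nil, h]
  | cons c ds ih =>
      intro cur acc
      rw [pv_go_cons, pv_go_cons]
      by_cases hs : PySem.Chars.isspace c = true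
      · rw [if_pos hs, if_pos hs]
        by_cases h : cur.isEmpty = true
        · rw [if_pos h, if_pos h]
          exact ih [] acc
        · rw [if_neg h, if_neg h]
          rw [ih [] (cur.reverse :: acc), ih [] [cur.reverse]]
          simp
      · rw [if_neg hs, if_neg hs]
        exact ih (c :: cur) acc

-- the streaming pass counts exactly the all-valid words produced by split₀.go
lemma pv_main :
    ∀ (ds cur : List Char) (count : Int),
      pvFin (ds.foldl pvStep (count, !cur.isEmpty, cur.all pvValid))
        = count + pvCount (PySem.Chars.split₀.go ds cur []) := by
  intro ds
  induction ds with
  | nil =>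
      intro cur count
      by_cases h : cur.isEmpty = true
      · simp [pvFin, pv_go_nil, h, pvCount]
      · simp only [List.foldl_nil, pvFin, pv_go_nil, h, if_false, Bool.false_eq_true]
        by_cases hv : cur.all pvValid = true <;>
          simp [hv, pvCount_cons, pvCount_nil]
  | cons c ds ih =>
      intro cur count
      by_cases hs : PySem.Chars.isspace c = true
      · by_cases h : cur.isEmpty = true
        · have hcur : cur = [] := List.isEmpty_iff.mp h
          subst hcur
          simp only [List.foldl_cons, pvStep, hs, if_true]
          simpa [pv_go_cons, hs] using ih [] count
        · simp only [List.foldl_cons, pvStep, hs, if_true]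
          have hrw : PySem.Chars.split₀.go (c :: ds) cur []
              = cur.reverse :: PySem.Chars.split₀.go ds [] [] := by
            simp only [pv_go_cons, hs, h, if_true, if_false, Bool.false_eq_true]
            rw [pv_go_acc ds [] [cur.reverse]]
            simp
          rw [hrw, pvCount_cons]
          have hih := ih [] (if (!cur.isEmpty) && cur.all pvValid then count + 1 else count)
          simp only [List.isEmpty_nil, Bool.not_true, List.all_nil] at hih
          rw [hih]
          by_cases hv : cur.all pvValid = true
          · simp [h, hv]
            omega
          · simp [h, hv]
      · simp only [List.foldl_cons, pvStep, hs, if_false, Bool.false_eq_true]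
        have hrep : ((count : Int), true, cur.all pvValid && pvValid c)
            = (count, !(c :: cur).isEmpty, (c :: cur).all pvValid) := by
          simp [List.all_cons, Bool.and_comm]
        rw [hrep, ih (c :: cur) count]
        simp [pv_go_cons, hs]

-- skipping punctuation in the loop = looping over the punctuation-free characters
lemma pv_skip_punct :
    ∀ (cs : List Char) (st : Int × Bool × Bool),
      cs.foldl (fun st c => if pvPunct c then st else pvStep st c) st
        = (cs.filter (fun c => !pvPunct c)).foldl pvStep st := by
  intro cs
  induction cs with
  | nil => simp
  | cons c cs ih =>
      intro st
      by_cases h : pvPunct c = true <;> simp [h, ih]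

-- ===== VERDICT (by name: the statement is the Claim_ definition above) =====
theorem howMany_spec : Claim_equal_howMany := by
  intro sentence _
  unfold Spec_howMany howMany howMany_alt
  dsimp only
  rw [pv_skip_punct]
  have hmain := pv_main ((sentence.toList).filter (fun c => !pvPunct c)) [] 0
  simp only [List.isEmpty_nil, Bool.not_true, List.all_nil, zero_add] at hmain
  rw [hmain]
  -- identify A's inline lambdas with B's named predicates (definitional)
  rw [show (fun (acc : List Char) (c : Char) =>
        if (".,?!".toList).contains c then acc else acc ++ [c])
      = (fun a c => if pvPunct c then a else a ++ [c]) from rfl]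
  rw [pv_foldl_append_ifnot pvPunct sentence.toList []]
  rw [List.nil_append]
  rw [show (fun (acc : List Char) (c : Char) =>
        if ("abcdefghijklmnopqrstuvwxyz-".toList).contains (PySem.Chars.lowerChar c)
        then acc ++ [c] else acc)
      = (fun a c => if pvValid c then a ++ [c] else a) from rfl]
  have hbody : (fun (ws : List (List Char)) (pw : List Char) =>
        if pw.foldl (fun a c => if pvValid c then a ++ [c] else a) [] == pw
        then ws ++ [pw.foldl (fun a c => if pvValid c then a ++ [c] else a) []] else ws)
      = (fun ws pw => if pw.filter pvValid == pw then ws ++ [pw.filter pvValid] else ws) := by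
    funext ws pw
    rw [pv_inner_filter]
  rw [hbody, pv_words_loop _ [], List.nil_append]
  rfl
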